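-- pv_equiv track=rewrite | github.com/Wouter0100/homeassistant-nanokvm | custom_components/nanokvm/camera_webrtc_sdp.py | _split_sdp_sections
-- ===== SOURCE A (Python) =====
-- def _split_sdp_sections(sdp: str) -> tuple[tuple[str, ...], tuple[tuple[str, ...], ...]]:
--     """Split SDP into session-level lines and media sections."""
--     lines = tuple(
--         line
--         for line in sdp.replace("\r\n", "\n").replace("\r", "\n").split("\n")
--         if line
--     )
--     session_lines: list[str] = []
--     media_sections: list[list[str]] = []
--     current_media: list[str] | None = None
--
--     for line in lines:
--         if line.startswith("m="):
--             current_media = [line]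
--             media_sections.append(current_media)
--         elif current_media is None:
--             session_lines.append(line)
--         else:
--             current_media.append(line)
--
--     return tuple(session_lines), tuple(tuple(section) for section in media_sections)
-- ===== SOURCE B (Python) =====
-- def _split_sdp_sections(sdp: str) -> tuple[tuple[str, ...], tuple[tuple[str, ...], ...]]:
--     """Split SDP into session-level lines and media sections (reverse scan)."""
--     lines = tuple(
--         line
--         for line in sdp.replace("\r\n", "\n").replace("\r", "\n").split("\n")
--         if line
--     )
--     sections: tuple[tuple[str, ...], ...] = ()
--     cur: tuple[str, ...] = ()
--     for line in reversed(lines):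
--         cur = (line,) + cur
--         if line.startswith("m="):
--             sections = (cur,) + sections
--             cur = ()
--     return cur, sections
-- ===== Notes on version B (the rewrite author's own statement) =====
-- stated objective: alternative
-- what changed: Replaces A's forward scan with a mutable current_media state machine (append-to-aliased-last-section) by a reverse traversal that builds the output back-to-front: each line is prepended to the pending section, and a media-boundary line closes that section; whatever remains pending at the start is the session-line prefix.
import Mathlib
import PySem

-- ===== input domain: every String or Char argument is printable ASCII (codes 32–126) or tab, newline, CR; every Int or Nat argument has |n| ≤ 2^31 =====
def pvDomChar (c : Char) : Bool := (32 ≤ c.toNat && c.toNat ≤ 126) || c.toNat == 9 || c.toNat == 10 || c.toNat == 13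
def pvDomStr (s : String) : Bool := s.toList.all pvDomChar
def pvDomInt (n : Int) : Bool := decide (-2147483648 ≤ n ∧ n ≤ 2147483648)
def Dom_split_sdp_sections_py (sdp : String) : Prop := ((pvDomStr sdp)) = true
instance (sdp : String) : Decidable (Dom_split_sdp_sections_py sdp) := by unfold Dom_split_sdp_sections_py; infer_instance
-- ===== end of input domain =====

-- B replaces A's forward scan with a mutable current-section state machine by a reverse
-- scan that builds the output back-to-front with no section-in-progress bookkeeping (objective: alternative).

-- ===== PORT A =====
-- normalized, "" filtered-out line list (identical first step of both Pythons); sep "\n" is nonempty so split? returns some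
def pvLines (sdp : String) : List String :=
  ((PySem.Str.split? (PySem.Str.replace (PySem.Str.replace sdp "\r\n" "\n") "\r" "\n") "\n").getD []).filter
    (fun line => line ≠ "")

-- A's for-loop: state = (session_lines, finished sections, current_media);
-- Python's aliasing (current_media is also the last element of media_sections) is modelled
-- by keeping current_media out of `done` until it is superseded or the loop ends.
def pvLoopA : List String → List String → List (List String) → Option (List String) →
    List String × List (List String)
  | [], sess, done, cur => (sess, done ++ cur.toList)
  | line :: ls, sess, done, cur =>
    if PySem.Str.startswith line "m=" then
      pvLoopA ls sess (done ++ cur.toList) (some [line])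
    else
      match cur with
      | none => pvLoopA ls (sess ++ [line]) done none
      | some c => pvLoopA ls sess done (some (c ++ [line]))

def split_sdp_sections_py (sdp : String) : List String × List (List String) :=
  pvLoopA (pvLines sdp) [] [] none

-- ===== PORT B =====
-- B's `for line in reversed(lines)` with prepends is the structural foldr over lines.
def split_sdp_sections_py_alt (sdp : String) : List String × List (List String) :=
  (pvLines sdp).foldr
    (fun line acc =>
      let cur := line :: acc.1
      if PySem.Str.startswith line "m=" then ([], cur :: acc.2) else (cur, acc.2))
    ([], [])

-- ===== PRECONDITION & SPEC =====
def Spec_split_sdp_sections_py (sdp : String) (out : List String × List (List String)) : Prop := out = split_sdp_sections_py_alt sdp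
instance (sdp : String) (out : List String × List (List String)) : Decidable (Spec_split_sdp_sections_py sdp out) := by unfold Spec_split_sdp_sections_py; infer_instance

-- ===== CLAIM (what is proved, stated in full; the proofs are below) =====
def Claim_equal_split_sdp_sections_py : Prop := ∀ (sdp : String), Dom_split_sdp_sections_py sdp → Spec_split_sdp_sections_py sdp (split_sdp_sections_py sdp)

-- ===== LEMMAS AND PROOFS =====

-- session lines of a line list: the prefix before the first "m=" line
def pvSess (ls : List String) : List String :=
  ls.takeWhile (fun l => !PySem.Str.startswith l "m=")

-- media sections of a line list
def pvSecs : List String → List (List String)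
  | [] => []
  | l :: ls =>
    if PySem.Str.startswith l "m=" then (l :: pvSess ls) :: pvSecs ls else pvSecs ls

theorem pvLoopA_some (ls : List String) : ∀ (sess : List String) (done : List (List String))
    (c : List String),
    pvLoopA ls sess done (some c) = (sess, done ++ (c ++ pvSess ls) :: pvSecs ls) := by
  induction ls with
  | nil => intro sess done c; simp [pvLoopA, pvSess, pvSecs]
  | cons l ls ih =>
    intro sess done c
    by_cases h : PySem.Chars.startswith l.toList ['m', '='] = true <;>
      simp [pvLoopA, pvSess, pvSecs, h, ih]

theorem pvLoopA_none (ls : List String) : ∀ (sess : List String),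
    pvLoopA ls sess [] none = (sess ++ pvSess ls, pvSecs ls) := by
  induction ls with
  | nil => intro sess; simp [pvLoopA, pvSess, pvSecs]
  | cons l ls ih =>
    intro sess
    by_cases h : PySem.Chars.startswith l.toList ['m', '='] = true
    · simp [pvLoopA, pvSess, pvSecs, h, pvLoopA_some]
    · simpa [pvLoopA, pvSess, pvSecs, h, List.takeWhile_cons] using ih (sess ++ [l])

theorem pvFoldrB (ls : List String) :
    ls.foldr
      (fun line acc =>
        let cur := line :: acc.1
        if PySem.Str.startswith line "m=" then ([], cur :: acc.2) else (cur, acc.2))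
      (([], []) : List String × List (List String)) = (pvSess ls, pvSecs ls) := by
  induction ls with
  | nil => simp [pvSess, pvSecs]
  | cons l ls ih =>
    rw [List.foldr_cons, ih]
    by_cases h : PySem.Chars.startswith l.toList ['m', '='] = true <;>
      simp [pvSess, pvSecs, h]

-- ===== VERDICT (by name: the statement is the Claim_ definition above) =====
theorem split_sdp_sections_py_spec : Claim_equal_split_sdp_sections_py := by
  intro sdp _
  show split_sdp_sections_py sdp = split_sdp_sections_py_alt sdp
  rw [split_sdp_sections_py, split_sdp_sections_py_alt, pvLoopA_none, pvFoldrB]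
  simp
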